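-- pv_equiv track=rewrite | github.com/Evan-cpe/TP1_Python | exercice_7.py | tricolore
-- ===== SOURCE A (Python) =====
-- def tricolore(n):
--     if not isinstance(n, int):
--         return "Merci de donner un nombre entier"
--     N=n**2
--     a = str(N)
--     for i in a:
--         if i not in ['1', '4', '9']:
--             return False
--     return True
-- ===== SOURCE B (Python) =====
-- def tricolore(n):
--     if not isinstance(n, int):
--         return "Merci de donner un nombre entier"
--     N = n ** 2
--     if N == 0:
--         return False
--     while N > 0:
--         if N % 10 not in (1, 4, 9):
--             return False
--         N //= 10
--     return True
-- ===== Notes on version B (the rewrite author's own statement) =====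
-- stated objective: alternative
-- what changed: B inspects the decimal digits of n**2 arithmetically (N % 10 / N //= 10 loop over integers) instead of converting to a string and scanning characters; a square with no positive digits is rejected by its own branch before the loop.
import Mathlib
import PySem

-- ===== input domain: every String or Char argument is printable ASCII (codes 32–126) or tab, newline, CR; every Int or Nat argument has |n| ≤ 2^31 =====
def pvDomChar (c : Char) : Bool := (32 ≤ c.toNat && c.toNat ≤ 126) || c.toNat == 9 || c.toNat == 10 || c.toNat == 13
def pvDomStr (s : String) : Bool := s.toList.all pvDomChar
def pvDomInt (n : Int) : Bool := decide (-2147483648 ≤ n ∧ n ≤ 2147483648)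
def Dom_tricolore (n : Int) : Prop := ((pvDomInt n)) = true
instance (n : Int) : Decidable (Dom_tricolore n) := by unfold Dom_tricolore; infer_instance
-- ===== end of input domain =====

-- B checks the digits of n**2 arithmetically with % 10 and //= 10 instead of scanning str(n**2).
-- (The isinstance guard of the Python is vacuous here: n is an Int by type.)

-- ===== PORT A =====
-- the 'for i in a: if i not in ['1','4','9']: return False' loop of A
def tricoloreLoopA : List Char → Bool
  | [] => true
  | c :: rest => if ¬ (c ∈ ['1', '4', '9']) then false else tricoloreLoopA rest

def tricolore (n : Int) : Bool :=
  let N := n ^ 2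
  let a := PySem.Int.toChars N      -- str(N), as its list of characters
  tricoloreLoopA a

-- ===== PORT B =====
-- the 'while N > 0' digit loop of B (N ≥ 0 here, so it runs on Nat)
def tricoloreLoopB (m : Nat) : Bool :=
  if h : m = 0 then true
  else
    let d := m % 10
    if d = 1 ∨ d = 4 ∨ d = 9 then tricoloreLoopB (m / 10) else false
decreasing_by exact Nat.div_lt_self (Nat.pos_of_ne_zero h) (by omega)

def tricolore_alt (n : Int) : Bool :=
  let N := n ^ 2
  if N = 0 then false else tricoloreLoopB N.toNat

-- ===== PRECONDITION & SPEC =====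
def Spec_tricolore (n : Int) (out : Bool) : Prop := out = tricolore_alt n
instance (n : Int) (out : Bool) : Decidable (Spec_tricolore n out) := by unfold Spec_tricolore; infer_instance

-- ===== CLAIM (what is proved, stated in full; the proofs are below) =====
def Claim_equal_tricolore : Prop := ∀ (n : Int), Dom_tricolore n → Spec_tricolore n (tricolore n)

-- ===== LEMMAS AND PROOFS =====

-- digit check on a single digit, as A's char test sees it after Nat.digitChar
def pvOkD (d : Nat) : Bool := d = 1 ∨ d = 4 ∨ d = 9

lemma pvOkChar_digitChar (d : Nat) (h : d < 10) :
    tricoloreLoopA [Nat.digitChar d] = pvOkD d := by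
  interval_cases d <;> decide

-- A's loop over Nat.toDigitsCore, against the arithmetic digit check
def pvAllD (m : Nat) : Bool :=
  if m / 10 = 0 then pvOkD (m % 10) else pvOkD (m % 10) && pvAllD (m / 10)
decreasing_by exact Nat.div_lt_self (by omega) (by omega)

lemma loopA_cons (c : Char) (l : List Char) :
    tricoloreLoopA (c :: l) = (tricoloreLoopA [c] && tricoloreLoopA l) := by
  by_cases h : c ∈ ['1', '4', '9'] <;> simp [tricoloreLoopA, h]

lemma loopA_toDigitsCore (f : Nat) : ∀ (m : Nat) (l : List Char), m < f →
    tricoloreLoopA (Nat.toDigitsCore 10 f m l) = (pvAllD m && tricoloreLoopA l) := by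
  induction f with
  | zero => intro m l h; omega
  | succ f ih =>
    intro m l h
    rw [Nat.toDigitsCore]
    by_cases h0 : m / 10 = 0
    · rw [if_pos h0, loopA_cons, pvOkChar_digitChar _ (Nat.mod_lt _ (by omega))]
      rw [pvAllD, if_pos h0]
    · rw [if_neg h0]
      have hm : m / 10 < f := by
        have := Nat.div_lt_self (show 0 < m by omega) (show (1:Nat) < 10 by omega)
        omega
      rw [ih _ _ hm, loopA_cons, pvOkChar_digitChar _ (Nat.mod_lt _ (by omega))]
      conv_rhs => rw [pvAllD]
      rw [if_neg h0, Bool.and_assoc, Bool.and_left_comm]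

-- B's loop agrees with pvAllD on every positive m
lemma loopB_eq_pvAllD : ∀ m : Nat, 0 < m → tricoloreLoopB m = pvAllD m := by
  intro m
  induction m using Nat.strong_induction_on with
  | _ m ih =>
    intro hm
    rw [tricoloreLoopB, dif_neg (by omega), pvAllD]
    by_cases h0 : m / 10 = 0
    · rw [if_pos h0]
      by_cases hd : m % 10 = 1 ∨ m % 10 = 4 ∨ m % 10 = 9
      · rw [if_pos hd, h0, tricoloreLoopB]
        simp [pvOkD, hd]
      · rw [if_neg hd]; simp [pvOkD, hd]
    · rw [if_neg h0]
      by_cases hd : m % 10 = 1 ∨ m % 10 = 4 ∨ m % 10 = 9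
      · rw [if_pos hd, ih (m / 10) (Nat.div_lt_self hm (by omega)) (by omega)]
        simp [pvOkD, hd]
      · rw [if_neg hd]; simp [pvOkD, hd]

-- ===== VERDICT (by name: the statement is the Claim_ definition above) =====
theorem tricolore_spec : Claim_equal_tricolore := by
  intro n _
  unfold Spec_tricolore tricolore tricolore_alt
  have hnn : (0:Int) ≤ n ^ 2 := sq_nonneg n
  set N : Int := n ^ 2 with hN
  simp only [PySem.Int.toChars, if_neg (not_lt.mpr hnn)]
  set m : Nat := N.toNat with hm
  rw [Nat.toDigits, loopA_toDigitsCore (m + 1) m [] (by omega)]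
  by_cases h0 : N = 0
  · have : m = 0 := by omega
    rw [if_pos h0, this, pvAllD]
    simp [pvOkD, tricoloreLoopA]
  · have hmpos : 0 < m := by omega
    rw [if_neg h0, loopB_eq_pvAllD m hmpos]
    simp [tricoloreLoopA]
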